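-- pv_equiv track=rewrite | github.com/deeptiGarg/interviewPrep | brickCode.py | non_rec_make_bricks
-- ===== SOURCE A (Python) =====
-- def non_rec_make_bricks(small, big, goal):
--     while((small > 0 or big > 0) and goal > 0):
--         if goal >= 5 and big > 0:
--             goal = goal - 5
--             big = big - 1
--         elif small > 0:
--             goal = goal - 1
--             small = small - 1
--         if goal == 0:
--             return True
--     return False
-- ===== SOURCE B (Python) =====
-- def non_rec_make_bricks(small, big, goal):
--     # Closed form: use as many big bricks as help (at most goal//5), then check
--     # the remainder is coverable by small bricks.
--     if goal <= 0:
--         return False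
--     rem = goal - 5 * min(max(big, 0), goal // 5)
--     return rem <= max(small, 0)
-- ===== Notes on version B (the rewrite author's own statement) =====
-- stated objective: faster
-- what changed: Replaced A's step-by-step brick-subtraction simulation loop with a closed-form arithmetic check (rem = goal - 5*min(max(big,0), goal//5) <= max(small,0)); Pre_ excludes only the inputs on which A's loop runs forever (goal>0 with small bricks exhausted short of goal%5 and big bricks left over), where A never returns.
import Mathlib
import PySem

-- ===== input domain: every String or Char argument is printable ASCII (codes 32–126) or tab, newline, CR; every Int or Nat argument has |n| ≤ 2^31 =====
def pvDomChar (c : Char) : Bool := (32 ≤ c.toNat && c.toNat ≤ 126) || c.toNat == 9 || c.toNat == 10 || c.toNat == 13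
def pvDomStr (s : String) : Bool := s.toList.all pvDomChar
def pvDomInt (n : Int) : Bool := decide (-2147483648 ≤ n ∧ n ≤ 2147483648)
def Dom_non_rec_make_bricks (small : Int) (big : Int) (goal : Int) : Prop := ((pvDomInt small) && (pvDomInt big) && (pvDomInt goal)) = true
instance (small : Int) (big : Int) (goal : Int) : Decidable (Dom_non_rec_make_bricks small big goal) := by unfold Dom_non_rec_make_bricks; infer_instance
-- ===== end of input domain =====

-- B replaces A's step-by-step simulation loop with O(1) closed-form arithmetic (objective: faster).

-- ===== PORT A =====
-- A's while-loop, transliterated with a fuel parameter that only makes the recursion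
-- total: on every input admitted by Pre_ the loop terminates well within the fuel
-- (each iteration that changes state decreases small.toNat + big.toNat).
def pvLoopA (small : Int) (big : Int) (goal : Int) : Nat → Bool
  | 0 => false
  | fuel + 1 =>
    if ((small > 0 || big > 0) && goal > 0) then
      if (goal ≥ 5 && big > 0) then
        if goal - 5 == 0 then true else pvLoopA small (big - 1) (goal - 5) fuel
      else if small > 0 then
        if goal - 1 == 0 then true else pvLoopA (small - 1) big (goal - 1) fuel
      else
        -- neither branch fires: the Python loop repeats with unchanged state
        pvLoopA small big goal fuel
    else false

def non_rec_make_bricks (small : Int) (big : Int) (goal : Int) : Bool :=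
  pvLoopA small big goal (small.toNat + big.toNat + 1)

-- ===== PORT B =====
def non_rec_make_bricks_alt (small : Int) (big : Int) (goal : Int) : Bool :=
  if goal ≤ 0 then false
  else
    let rem := goal - 5 * min (max big 0) (PySem.Int.floordiv goal 5)
    decide (rem ≤ max small 0)

-- ===== PRECONDITION & SPEC =====
-- Pre_ excludes exactly the inputs on which A's while-loop runs forever (it neither
-- returns nor raises): goal > 0 with small exhausted (small < goal % 5), goal not a
-- multiple of 5 within reach, and big bricks left over so no branch changes the state.
def Pre_non_rec_make_bricks (small : Int) (big : Int) (goal : Int) : Prop :=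
  ¬(0 < goal ∧ goal / 5 < big ∧ goal % 5 ≠ 0 ∧ small < goal % 5)
instance (small : Int) (big : Int) (goal : Int) : Decidable (Pre_non_rec_make_bricks small big goal) := by unfold Pre_non_rec_make_bricks; infer_instance
def pvWitness_non_rec_make_bricks : Int × Int × Int := (3, 1, 7)

def Spec_non_rec_make_bricks (small : Int) (big : Int) (goal : Int) (out : Bool) : Prop := out = non_rec_make_bricks_alt small big goal
instance (small : Int) (big : Int) (goal : Int) (out : Bool) : Decidable (Spec_non_rec_make_bricks small big goal out) := by unfold Spec_non_rec_make_bricks; infer_instance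

-- ===== CLAIM (what is proved, stated in full; the proofs are below) =====
def Claim_equal_non_rec_make_bricks : Prop := ∀ (small : Int) (big : Int) (goal : Int), Dom_non_rec_make_bricks small big goal → Pre_non_rec_make_bricks small big goal → Spec_non_rec_make_bricks small big goal (non_rec_make_bricks small big goal)

-- ===== LEMMAS AND PROOFS =====

theorem alt_eq_decide (small big goal : Int) :
    non_rec_make_bricks_alt small big goal
      = decide (0 < goal ∧ goal - 5 * min (max big 0) (goal / 5) ≤ max small 0) := by
  unfold non_rec_make_bricks_alt
  by_cases h : goal ≤ 0
  · rw [if_pos h]; symm; rw [decide_eq_false_iff_not]; omega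
  · rw [if_neg h]
    show decide (goal - 5 * min (max big 0) (PySem.Int.floordiv goal 5) ≤ max small 0) = _
    rw [PySem.Int.floordiv_eq_ediv_of_pos (by norm_num), decide_eq_decide]
    omega

theorem loop_eq (fuel : Nat) : ∀ (small big goal : Int),
    small.toNat + big.toNat < fuel →
    Pre_non_rec_make_bricks small big goal →
    pvLoopA small big goal fuel = non_rec_make_bricks_alt small big goal := by
  induction fuel with
  | zero => intro s b g hf _; omega
  | succ n ih =>
    intro s b g hf hpre
    unfold Pre_non_rec_make_bricks at hpre
    unfold pvLoopA
    by_cases hc : (s > 0 ∨ b > 0) ∧ g > 0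
    · rw [if_pos (by simpa using hc)]
      by_cases hb : g ≥ 5 ∧ b > 0
      · rw [if_pos (by simpa using hb)]
        by_cases hz : g - 5 = 0
        · rw [if_pos (by simpa using hz), alt_eq_decide]
          symm; rw [decide_eq_true_iff]; omega
        · rw [if_neg (by simpa using hz),
              ih s (b - 1) (g - 5) (by omega) (by unfold Pre_non_rec_make_bricks; omega),
              alt_eq_decide, alt_eq_decide, decide_eq_decide]
          omega
      · rw [if_neg (by simpa using hb)]
        by_cases hs : s > 0
        · rw [if_pos (by simpa using hs)]
          by_cases hz : g - 1 = 0
          · rw [if_pos (by simpa using hz), alt_eq_decide]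
            symm; rw [decide_eq_true_iff]; omega
          · rw [if_neg (by simpa using hz),
                ih (s - 1) b (g - 1) (by omega) (by unfold Pre_non_rec_make_bricks; omega),
                alt_eq_decide, alt_eq_decide, decide_eq_decide]
            omega
        · -- stuck state: contradicts Pre_
          exfalso; omega
    · rw [if_neg (by simpa using hc), alt_eq_decide]
      symm; rw [decide_eq_false_iff_not]; omega

-- ===== VERDICT (by name: the statement is the Claim_ definition above) =====
theorem non_rec_make_bricks_spec : Claim_equal_non_rec_make_bricks := by
  intro s b g _ hpre
  unfold Spec_non_rec_make_bricks non_rec_make_bricks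
  exact loop_eq _ s b g (by omega) hpre
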